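-- pv_equiv track=rewrite | github.com/MrBrantCode/unitest_baseline | mut_generate/mist_train_taco/taco_2507/solution.py | find_prime_sum_primes
-- ===== SOURCE A (Python) =====
-- import math
--
-- def find_prime_sum_primes(t, test_cases):
--     def is_prime(num):
--         if num < 2:
--             return False
--         for i in range(2, int(math.sqrt(num)) + 1):
--             if num % i == 0:
--                 return False
--         return True
--
--     maxi = max(test_cases)
--     primes = [j for j in range(2, maxi + 1) if is_prime(j)]
--
--     prime_sum_primes = []
--     for j in primes:
--         for k in primes:
--             if k <= j:
--                 continue
--             if k + j > maxi:
--                 break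
--             if is_prime(k + j):
--                 if k + j not in prime_sum_primes:
--                     prime_sum_primes.append(k + j)
--
--     results = []
--     for n in test_cases:
--         results.append([x for x in prime_sum_primes if x <= n])
--
--     return results
-- ===== SOURCE B (Python) =====
-- import math
--
-- def find_prime_sum_primes(t, test_cases):
--     # A prime that is a sum of two primes must be 2 + q with q prime (any other
--     # prime sum is even), so collect twin-prime upper members in one ascending pass.
--     def is_prime(num):
--         if num < 2:
--             return False
--         for i in range(2, int(math.sqrt(num)) + 1):
--             if num % i == 0:
--                 return False
--         return True
--
--     maxi = max(test_cases)
--     twins = [p for p in range(5, maxi + 1) if is_prime(p) and is_prime(p - 2)]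
--     return [[x for x in twins if x <= n] for n in test_cases]
-- ===== Notes on version B (the rewrite author's own statement) =====
-- stated objective: faster
-- what changed: A enumerates all prime pairs (j,k) in a nested loop with a linear membership check to build the list of primes that are sums of two primes; B uses the fact that a prime sum of two primes must be 2+q with q prime, so it collects p in one ascending pass over 5..max where p and p-2 are both prime (no pair loop, no dedup scan).
import Mathlib
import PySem

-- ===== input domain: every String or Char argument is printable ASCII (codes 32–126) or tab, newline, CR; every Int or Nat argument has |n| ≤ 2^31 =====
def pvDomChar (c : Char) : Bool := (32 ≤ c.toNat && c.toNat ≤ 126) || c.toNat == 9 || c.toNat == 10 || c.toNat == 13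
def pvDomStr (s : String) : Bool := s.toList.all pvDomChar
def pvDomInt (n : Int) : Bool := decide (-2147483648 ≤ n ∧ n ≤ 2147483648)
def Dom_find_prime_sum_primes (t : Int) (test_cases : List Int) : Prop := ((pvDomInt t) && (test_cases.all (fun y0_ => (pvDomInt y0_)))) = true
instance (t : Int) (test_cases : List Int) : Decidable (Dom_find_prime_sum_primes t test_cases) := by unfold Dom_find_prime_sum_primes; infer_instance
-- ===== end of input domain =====

-- B replaces A's nested prime-pair enumeration (with a linear dedup scan) by one
-- ascending pass collecting p where p and p-2 are both prime; measured faster.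

-- ===== PORT A =====
-- is_prime: int(math.sqrt(num)) is ported as Nat.sqrt num.toNat, exact for the
-- nonnegative arguments (≤ 2^31) this program feeds it (double sqrt is exact in
-- integer part up to 2^52).
def ispA (num : Int) : Bool :=
  if num < 2 then false
  else (PySem.List.pyRange 2 ((Nat.sqrt num.toNat : Int) + 1) 1).all
         (fun i => !(PySem.Int.mod num i == 0))

-- the inner `for k in primes` loop of A, with its continue / break / membership test
def innerA (j maxi : Int) : List Int → List Int → List Int
  | [], acc => acc
  | k :: ks, acc =>
    if k ≤ j then innerA j maxi ks acc
    else if maxi < k + j then acc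
    else if ispA (k + j) && !(acc.contains (k + j)) then innerA j maxi ks (acc ++ [k + j])
    else innerA j maxi ks acc

def find_prime_sum_primes (t : Int) (test_cases : List Int) : List (List Int) :=
  match PySem.List.max? test_cases (fun x => x) with
  | none => []   -- max([]) raises ValueError in Python; excluded by Pre_
  | some maxi =>
    let primes := (PySem.List.pyRange 2 (maxi + 1) 1).filter ispA
    let psp := primes.foldl (fun acc j => innerA j maxi primes acc) []
    test_cases.map (fun n => psp.filter (fun x => decide (x ≤ n)))

-- ===== PORT B =====
-- B's is_prime is the same helper text as A's
def ispB (num : Int) : Bool :=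
  if num < 2 then false
  else (PySem.List.pyRange 2 ((Nat.sqrt num.toNat : Int) + 1) 1).all
         (fun i => !(PySem.Int.mod num i == 0))

def find_prime_sum_primes_alt (t : Int) (test_cases : List Int) : List (List Int) :=
  match PySem.List.max? test_cases (fun x => x) with
  | none => []   -- max([]) raises ValueError in Python; excluded by Pre_
  | some maxi =>
    let twins := (PySem.List.pyRange 5 (maxi + 1) 1).filter (fun p => ispB p && ispB (p - 2))
    test_cases.map (fun n => twins.filter (fun x => decide (x ≤ n)))

-- ===== PRECONDITION & SPEC =====
-- Pre_ excludes only the empty query list, on which A (and B) raise ValueError in max().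
def Pre_find_prime_sum_primes (t : Int) (test_cases : List Int) : Prop := test_cases ≠ []
instance (t : Int) (test_cases : List Int) : Decidable (Pre_find_prime_sum_primes t test_cases) := by unfold Pre_find_prime_sum_primes; infer_instance
def pvWitness_find_prime_sum_primes : Int × List Int := (1, [10])

def Spec_find_prime_sum_primes (t : Int) (test_cases : List Int) (out : List (List Int)) : Prop := out = find_prime_sum_primes_alt t test_cases
instance (t : Int) (test_cases : List Int) (out : List (List Int)) : Decidable (Spec_find_prime_sum_primes t test_cases out) := by unfold Spec_find_prime_sum_primes; infer_instance

-- ===== CLAIM (what is proved, stated in full; the proofs are below) =====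
def Claim_equal_find_prime_sum_primes : Prop := ∀ (t : Int) (test_cases : List Int), Dom_find_prime_sum_primes t test_cases → Pre_find_prime_sum_primes t test_cases → Spec_find_prime_sum_primes t test_cases (find_prime_sum_primes t test_cases)

-- ===== LEMMAS AND PROOFS =====

theorem ispA_even_false {n : Int} (h4 : 4 ≤ n) (he : n % 2 = 0) : ispA n = false := by
  unfold ispA
  rw [if_neg (by omega)]
  rw [List.all_eq_false]
  refine ⟨2, ?_, ?_⟩
  · rw [PySem.List.mem_pyRange_one]
    have : 2 ≤ Nat.sqrt n.toNat := by
      rw [Nat.le_sqrt]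
      omega
    omega
  · rw [PySem.Int.mod_eq_emod_of_pos (show (0:Int) < 2 by omega)]
    simp [he]

theorem ispA_odd {k : Int} (hk : 2 < k) (h : ispA k = true) : k % 2 = 1 := by
  by_contra hne
  have h0 : k % 2 = 0 := by omega
  rw [ispA_even_false (by omega) h0] at h
  exact Bool.false_ne_true h

theorem innerA_odd (j maxi : Int) (hj : 3 ≤ j) (hjo : j % 2 = 1)
    (ks : List Int) (hks : ∀ k ∈ ks, ispA k = true) (acc : List Int) :
    innerA j maxi ks acc = acc := by
  induction ks with
  | nil => rfl
  | cons k ks ih =>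
    have hkp := hks k (List.mem_cons_self ..)
    have ih' := ih (fun x hx => hks x (List.mem_cons_of_mem _ hx))
    unfold innerA
    by_cases h1 : k ≤ j
    · simp [h1, ih']
    · by_cases h2 : maxi < k + j
      · simp [h1, h2]
      · have hko : k % 2 = 1 := ispA_odd (by omega) hkp
        have : ispA (k + j) = false := ispA_even_false (by omega) (by omega)
        simp [h1, h2, this, ih']

theorem ispA_two : ispA 2 = true := by
  unfold ispA
  have h1 : Nat.sqrt (Int.toNat 2) < 2 := Nat.sqrt_lt_self (by norm_num)
  rw [if_neg (by omega)]
  rw [PySem.List.pyRange_one_eq_nil (by omega)]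
  rfl

theorem foldl_id {α β : Type} (f : β → α → β) (l : List α) (acc : β)
    (h : ∀ j ∈ l, ∀ a, f a j = a) : l.foldl f acc = acc := by
  induction l generalizing acc with
  | nil => rfl
  | cons x l ih =>
    rw [List.foldl_cons, h x (List.mem_cons_self ..)]
    exact ih acc (fun j hj => h j (List.mem_cons_of_mem _ hj))

theorem innerA_two (maxi : Int) (ks : List Int) (hks : ks.Pairwise (· < ·)) (acc : List Int)
    (hacc : ∀ x ∈ acc, ∀ k ∈ ks, x < k + 2) :
    innerA 2 maxi ks acc =
      acc ++ (ks.filter (fun k => decide (2 < k) && (decide (k + 2 ≤ maxi) && ispA (k + 2)))).map (· + 2) := by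
  induction ks generalizing acc with
  | nil => simp [innerA]
  | cons k ks ih =>
    rw [List.pairwise_cons] at hks
    obtain ⟨hlt, hpw⟩ := hks
    unfold innerA
    by_cases h1 : k ≤ 2
    · rw [if_pos h1]
      rw [ih hpw acc (fun x hx k' hk' => hacc x hx k' (List.mem_cons_of_mem _ hk'))]
      simp [show ¬(2 < k) by omega]
    · rw [if_neg h1]
      by_cases h2 : maxi < k + 2
      · rw [if_pos h2]
        have : ∀ k' ∈ k :: ks, (decide (2 < k') && (decide (k' + 2 ≤ maxi) && ispA (k' + 2))) ≠ true := by
          intro k' hk'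
          rcases List.mem_cons.mp hk' with h | h
          · subst h; simp; omega
          · have := hlt k' h; simp; intro _ h'; omega
        rw [List.filter_eq_nil_iff.mpr (by intro a ha; exact this a ha)]
        simp
      · rw [if_neg h2]
        by_cases h3 : ispA (k + 2) = true
        · have hnc : acc.contains (k + 2) = false := by
            rw [List.contains_eq_mem]
            simp only [decide_eq_false_iff_not]
            intro hmem
            exact absurd (hacc _ hmem k (List.mem_cons_self ..)) (by omega)
          rw [if_pos (by rw [h3, hnc]; rfl)]
          rw [ih hpw (acc ++ [k + 2]) ?_]
          · rw [List.filter_cons_of_pos (by simp [h3]; omega)]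
            simp
          · intro x hx k' hk'
            rcases List.mem_append.mp hx with h | h
            · exact lt_trans (hacc x h k (List.mem_cons_self ..)) (by have := hlt k' hk'; omega)
            · simp at h; subst h; have := hlt k' hk'; omega
        · rw [if_neg (by simp [h3])]
          rw [ih hpw acc (fun x hx k' hk' => hacc x hx k' (List.mem_cons_of_mem _ hk'))]
          rw [List.filter_cons_of_neg (by simp [h3])]

theorem shift_lemma (maxi : Int) :
    ((PySem.List.pyRange 2 (maxi + 1) 1).filter
        (fun k => decide (2 < k) && (decide (k + 2 ≤ maxi) && ispA (k + 2)) && ispA k)).map (· + 2)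
    = (PySem.List.pyRange 5 (maxi + 1) 1).filter (fun p => ispB p && ispB (p - 2)) := by
  by_cases h5 : maxi ≤ 4
  · rw [List.filter_eq_nil_iff.mpr, PySem.List.pyRange_one_eq_nil (by omega), List.filter_nil, List.map_nil]
    intro k hk
    rw [PySem.List.mem_pyRange_one] at hk
    simp; intro _ _ h; omega
  · push Not at h5
    rw [PySem.List.pyRange_one_append 2 3 (maxi+1) (by omega) (by omega),
        PySem.List.pyRange_one_append 3 (maxi-1) (maxi+1) (by omega) (by omega)]
    rw [List.filter_append, List.filter_append, List.map_append, List.map_append]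
    have e1 : (PySem.List.pyRange 2 3 1).filter
        (fun k => decide (2 < k) && (decide (k + 2 ≤ maxi) && ispA (k + 2)) && ispA k) = [] := by
      rw [List.filter_eq_nil_iff]
      intro k hk
      rw [PySem.List.mem_pyRange_one] at hk
      intro hc
      simp only [Bool.and_eq_true, decide_eq_true_eq] at hc
      obtain ⟨⟨h1x, h2x, _⟩, _⟩ := hc
      omega
    have e3 : (PySem.List.pyRange (maxi-1) (maxi+1) 1).filter
        (fun k => decide (2 < k) && (decide (k + 2 ≤ maxi) && ispA (k + 2)) && ispA k) = [] := by
      rw [List.filter_eq_nil_iff]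
      intro k hk
      rw [PySem.List.mem_pyRange_one] at hk
      intro hc
      simp only [Bool.and_eq_true, decide_eq_true_eq] at hc
      obtain ⟨⟨h1x, h2x, _⟩, _⟩ := hc
      omega
    have e2 : (PySem.List.pyRange 3 (maxi-1) 1).filter
        (fun k => decide (2 < k) && (decide (k + 2 ≤ maxi) && ispA (k + 2)) && ispA k)
        = (PySem.List.pyRange 3 (maxi-1) 1).filter (fun k => ispA (k + 2) && ispA k) := by
      apply List.filter_congr
      intro k hk
      rw [PySem.List.mem_pyRange_one] at hk
      simp [show 2 < k by omega, show k + 2 ≤ maxi by omega, Bool.and_comm]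
    have e4 : PySem.List.pyRange 5 (maxi + 1) 1 = (PySem.List.pyRange 3 (maxi-1) 1).map (· + 2) := by
      rw [PySem.List.pyRange_one, PySem.List.pyRange_one, List.map_map]
      have : ((maxi + 1 - 5).toNat) = ((maxi - 1 - 3).toNat) := by omega
      rw [this]
      apply List.map_congr_left
      intro k _
      simp; omega
    rw [e1, e2, e3, e4, List.filter_map]
    simp only [List.map_nil, List.nil_append, List.append_nil]
    congr 1
    apply List.filter_congr
    intro k _
    show (ispA (k + 2) && ispA k) = (ispB (k+2) && ispB (k+2-2))
    have : k + 2 - 2 = k := by omega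
    rw [this]
    rfl

theorem psp_eq_twins (maxi : Int) :
    ((PySem.List.pyRange 2 (maxi + 1) 1).filter ispA).foldl
      (fun acc j => innerA j maxi ((PySem.List.pyRange 2 (maxi + 1) 1).filter ispA) acc) []
    = (PySem.List.pyRange 5 (maxi + 1) 1).filter (fun p => ispB p && ispB (p - 2)) := by
  by_cases h2 : maxi < 2
  · rw [PySem.List.pyRange_one_eq_nil (show maxi + 1 ≤ 2 by omega),
        PySem.List.pyRange_one_eq_nil (show maxi + 1 ≤ 5 by omega)]
    rfl
  · push Not at h2
    have hprimes : ∀ k ∈ (PySem.List.pyRange 2 (maxi + 1) 1).filter ispA, ispA k = true := by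
      intro k hk; exact (List.mem_filter.mp hk).2
    have hpw : ((PySem.List.pyRange 2 (maxi + 1) 1).filter ispA).Pairwise (· < ·) :=
      List.Pairwise.sublist List.filter_sublist (PySem.List.pairwise_lt_pyRange_one 2 (maxi+1))
    have hsplit : PySem.List.pyRange 2 (maxi + 1) 1 = 2 :: PySem.List.pyRange 3 (maxi + 1) 1 := by
      have := PySem.List.pyRange_one_cons (a := 2) (b := maxi + 1) (by omega)
      simpa using this
    rw [hsplit, List.filter_cons_of_pos ispA_two, List.foldl_cons]
    rw [foldl_id _ _ _ ?_]
    · rw [← List.filter_cons_of_pos ispA_two, ← hsplit]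
      rw [innerA_two maxi _ hpw [] (by simp)]
      rw [List.nil_append, List.filter_filter, shift_lemma]
    · intro j hj acc
      rw [List.mem_filter, PySem.List.mem_pyRange_one] at hj
      exact innerA_odd j maxi (by omega) (ispA_odd (by omega) hj.2) _
        (by rw [← List.filter_cons_of_pos ispA_two, ← hsplit] at *; exact hprimes) acc

-- ===== VERDICT (by name: the statement is the Claim_ definition above) =====
theorem find_prime_sum_primes_spec : Claim_equal_find_prime_sum_primes := by
  intro t test_cases _ hpre
  unfold Spec_find_prime_sum_primes find_prime_sum_primes find_prime_sum_primes_alt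
  cases hmax : PySem.List.max? test_cases (fun x => x) with
  | none => rfl
  | some maxi => simp only [psp_eq_twins maxi]
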